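-- pv_equiv track=rewrite | github.com/Rajasekhar1131997/TIP102_Sessions | Unit_4/Week4Session2_SPSV1.py | most_frequent_spaces
-- ===== SOURCE A (Python) =====
-- def most_frequent_spaces(visits):
--     if not visits:
--         return []
--     if len(visits) < 2:
--         return visits
--     dictionary = {}
--     for visit in visits:
--         dictionary[visit] = dictionary.get(visit, 0) + 1
--     max_count = max(dictionary.values())
--     result = [visit for visit, count in dictionary.items() if count == max_count]
--     return result
-- ===== SOURCE B (Python) =====
-- def most_frequent_spaces(visits):
--     if not visits:
--         return []
--     max_count = max(visits.count(v) for v in visits)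
--     result = []
--     for v in visits:
--         if v not in result and visits.count(v) == max_count:
--             result.append(v)
--     return result
-- ===== Notes on version B (the rewrite author's own statement) =====
-- stated objective: alternative
-- what changed: B drops the counting dictionary entirely: it computes the maximal frequency by nested list.count scans and builds the result in one ordered dedup-plus-filter pass over the input, instead of A's hash-count / max-over-values / filter-items pipeline; it trades A's O(n) for O(n^2).
import Mathlib
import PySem

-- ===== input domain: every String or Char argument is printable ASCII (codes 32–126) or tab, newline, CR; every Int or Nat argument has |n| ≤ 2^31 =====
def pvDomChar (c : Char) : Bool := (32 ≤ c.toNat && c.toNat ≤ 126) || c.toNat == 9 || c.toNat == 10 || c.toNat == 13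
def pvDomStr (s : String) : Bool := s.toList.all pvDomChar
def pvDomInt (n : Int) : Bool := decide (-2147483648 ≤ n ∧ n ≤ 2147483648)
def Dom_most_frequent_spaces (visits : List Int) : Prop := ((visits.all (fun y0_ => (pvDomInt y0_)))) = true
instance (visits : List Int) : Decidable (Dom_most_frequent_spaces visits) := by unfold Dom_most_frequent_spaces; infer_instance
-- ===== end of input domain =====

-- B drops A's counting dictionary: it finds the maximal frequency by nested list.count scans and
-- builds the answer in one ordered dedup-plus-filter pass (objective: alternative; B is not faster).

-- ===== PORT A =====
-- A's local 'dictionary' (the counting loop), lifted to a helper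
def pvDictionary (visits : List Int) : PySem.Dict Int Int :=
  visits.foldl (fun d visit => d.insert visit (d.getD visit 0 + 1)) PySem.Dict.empty

def most_frequent_spaces (visits : List Int) : List Int :=
  if visits = [] then []
  else if visits.length < 2 then visits
  else
    -- max(dictionary.values()); the none branch is unreachable since visits ≠ []
    match PySem.List.max? (pvDictionary visits).values (fun x => x) with
    | some max_count => ((pvDictionary visits).items.filter (fun p => p.2 == max_count)).map (fun p => p.1)
    | none => []

-- ===== PORT B =====
def most_frequent_spaces_alt (visits : List Int) : List Int :=
  if visits = [] then []
  else
    -- max(visits.count(v) for v in visits); the none branch is unreachable since visits ≠ []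
    match PySem.List.max? (visits.map (fun v => (visits.count v : Int))) (fun x => x) with
    | some max_count =>
        visits.foldl (fun result v =>
          if !(result.contains v) && ((visits.count v : Int) == max_count)
          then result ++ [v] else result) []
    | none => []

-- ===== PRECONDITION & SPEC =====
def Spec_most_frequent_spaces (visits : List Int) (out : List Int) : Prop := out = most_frequent_spaces_alt visits
instance (visits : List Int) (out : List Int) : Decidable (Spec_most_frequent_spaces visits out) := by unfold Spec_most_frequent_spaces; infer_instance

-- ===== CLAIM (what is proved, stated in full; the proofs are below) =====
def Claim_equal_most_frequent_spaces : Prop := ∀ (visits : List Int), Dom_most_frequent_spaces visits → Spec_most_frequent_spaces visits (most_frequent_spaces visits)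

-- ===== LEMMAS AND PROOFS =====

lemma pvDict_eq_counter (visits : List Int) : pvDictionary visits = PySem.Dict.counter visits :=
  PySem.Dict.foldl_insert_getD_add_one_eq_counter visits

lemma pvValues (visits : List Int) :
    (pvDictionary visits).values = (PySem.Set.ofList visits).map (fun v => (visits.count v : Int)) := by
  rw [pvDict_eq_counter]
  simp [PySem.Dict.values, PySem.Dict.items_counter, List.map_map, Function.comp_def]

-- the dict's values and B's generator list have the same members (dedup keeps membership)
lemma pvValues_mem (visits : List Int) (x : Int) :
    x ∈ (pvDictionary visits).values ↔ x ∈ visits.map (fun v => (visits.count v : Int)) := by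
  rw [pvValues]
  simp only [List.mem_map]
  constructor
  · rintro ⟨v, hv, rfl⟩
    exact ⟨v, (PySem.Set.mem_ofList _ _).mp hv, rfl⟩
  · rintro ⟨v, hv, rfl⟩
    exact ⟨v, (PySem.Set.mem_ofList _ _).mpr hv, rfl⟩

lemma pvValues_ne (visits : List Int) (h : visits ≠ []) : (pvDictionary visits).values ≠ [] := by
  rw [pvValues]
  cases visits with
  | nil => exact absurd rfl h
  | cons a t =>
    intro he
    have : a ∈ PySem.Set.ofList (a :: t) := (PySem.Set.mem_ofList _ _).mpr (List.mem_cons_self ..)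
    have := List.mem_map_of_mem (f := fun v => ((a :: t).count v : Int)) this
    rw [he] at this
    simp at this

-- max over two nonempty lists with the same members is the same number
lemma pvMax_eq (l₁ l₂ : List Int) (h : ∀ x, x ∈ l₁ ↔ x ∈ l₂) (h₁ : l₁ ≠ []) :
    PySem.List.max? l₁ (fun x => x) = PySem.List.max? l₂ (fun x => x) := by
  have h₂ : l₂ ≠ [] := by
    cases l₁ with
    | nil => exact absurd rfl h₁
    | cons x xs => intro he; have := (h x).mp (List.mem_cons_self ..); simp [he] at this
  obtain ⟨m₁, hm₁⟩ := Option.ne_none_iff_exists'.mp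
    (fun he => h₁ ((PySem.List.max?_eq_none_iff l₁ (fun x => x)).mp he))
  obtain ⟨m₂, hm₂⟩ := Option.ne_none_iff_exists'.mp
    (fun he => h₂ ((PySem.List.max?_eq_none_iff l₂ (fun x => x)).mp he))
  rw [hm₁, hm₂]
  have e1 : m₁ ≤ m₂ := PySem.List.max?_isMax hm₂ m₁ ((h m₁).mp (PySem.List.max?_mem hm₁))
  have e2 : m₂ ≤ m₁ := PySem.List.max?_isMax hm₁ m₂ ((h m₂).mpr (PySem.List.max?_mem hm₂))
  exact congrArg some (le_antisymm e1 e2)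

lemma pvFoldAdd_filter (p : Int → Bool) (xs : List Int) : ∀ s : List Int,
    (xs.foldl PySem.Set.add s).filter p = (xs.filter p).foldl PySem.Set.add (s.filter p) := by
  induction xs with
  | nil => intro s; simp
  | cons x t ih =>
    intro s
    simp only [List.foldl_cons, List.filter_cons]
    by_cases hx : x ∈ s
    · by_cases hp : p x
      · rw [ih]
        simp [PySem.Set.add, PySem.Set.contains, hx, hp, List.mem_filter]
      · rw [ih]
        simp [PySem.Set.add, PySem.Set.contains, hx, hp]
    · by_cases hp : p x
      · rw [ih]
        simp [PySem.Set.add, PySem.Set.contains, hx, hp, List.filter_append, List.mem_filter]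
      · rw [ih]
        simp [PySem.Set.add, PySem.Set.contains, hx, hp, List.filter_append]

-- dedup-by-first-occurrence commutes with filtering on the element's value
lemma pvOfList_filter (p : Int → Bool) (xs : List Int) :
    (PySem.Set.ofList xs).filter p = PySem.Set.ofList (xs.filter p) := by
  rw [PySem.Set.ofList_eq_foldl, PySem.Set.ofList_eq_foldl, pvFoldAdd_filter]
  simp

-- B's loop is the ordered dedup of the filtered input
lemma pvAltLoop (p : Int → Bool) (l : List Int) :
    l.foldl (fun result v => if !(result.contains v) && p v then result ++ [v] else result) ([] : List Int) =
      PySem.Set.ofList (l.filter p) := by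
  have hstep : (fun (result : List Int) v => if !(result.contains v) && p v then result ++ [v] else result)
      = fun result v => if p v then PySem.Set.add result v else result := by
    funext r v
    by_cases hv : v ∈ r
    · simp [PySem.Set.add, PySem.Set.contains, hv, List.contains_eq_mem]
    · by_cases hp : p v <;>
        simp [PySem.Set.add, PySem.Set.contains, hv, hp, List.contains_eq_mem]
  rw [hstep, PySem.List.foldl_if_eq_foldl_filter, PySem.Set.ofList_eq_foldl]

-- A's filter-the-items pass, rewritten as a filter of the dedup'd keys
lemma pvA_result (visits : List Int) (M : Int) :
    ((pvDictionary visits).items.filter (fun p => p.2 == M)).map (fun p => p.1)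
      = (PySem.Set.ofList visits).filter (fun v => (visits.count v : Int) == M) := by
  rw [pvDict_eq_counter, PySem.Dict.items_counter, List.filter_map, List.map_map]
  simp [Function.comp_def]

-- ===== VERDICT (by name: the statement is the Claim_ definition above) =====
theorem most_frequent_spaces_spec : Claim_equal_most_frequent_spaces := by
  intro visits _
  unfold Spec_most_frequent_spaces
  by_cases h0 : visits = []
  · simp [most_frequent_spaces, most_frequent_spaces_alt, h0]
  · have hBne : visits.map (fun v => (visits.count v : Int)) ≠ [] := by
      simpa using h0
    obtain ⟨M, hMB⟩ := Option.ne_none_iff_exists'.mp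
      (fun he => hBne ((PySem.List.max?_eq_none_iff _ (fun x : Int => x)).mp he))
    have hMA : PySem.List.max? (pvDictionary visits).values (fun x => x) = some M := by
      rw [pvMax_eq _ _ (pvValues_mem visits) (pvValues_ne visits h0)]; exact hMB
    have hB : most_frequent_spaces_alt visits
        = PySem.Set.ofList (visits.filter (fun v => (visits.count v : Int) == M)) := by
      unfold most_frequent_spaces_alt
      rw [if_neg h0, hMB]
      exact pvAltLoop _ _
    unfold most_frequent_spaces
    rw [if_neg h0]
    by_cases h1 : visits.length < 2
    · obtain ⟨x, hx⟩ : ∃ x, visits = [x] := by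
        cases visits with
        | nil => exact absurd rfl h0
        | cons a t => cases t with
          | nil => exact ⟨a, rfl⟩
          | cons b u => simp at h1
      subst hx
      have hM1 : M = 1 := by
        simp [PySem.List.max?_id_cons, List.count_singleton] at hMB
        omega
      subst hM1
      rw [if_pos h1, hB]
      simp [PySem.Set.ofList, PySem.Set.add, List.count_singleton]
    · rw [if_neg h1, hMA, hB]
      exact (pvA_result visits M).trans (pvOfList_filter _ _)
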